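-- pv_equiv track=rewrite | github.com/ayoubzulfiqar/Leetcode-Medium | MaximumNumberofUpgradableServers/maximum_number_of_upgradable_servers.py | max_upgradable_servers
-- ===== SOURCE A (Python) =====
-- import collections
--
-- def max_upgradable_servers(n: int, k: int, upgrades: list[int]) -> int:
--     upgrade_counts = collections.Counter(upgrades)
--
--     def can_upgrade(num_servers_to_check: int) -> bool:
--         if num_servers_to_check == 0:
--             return True
--
--         total_possible_distinct_slots = 0
--         for count in upgrade_counts.values():
--             total_possible_distinct_slots += min(count, num_servers_to_check)
--
--         return total_possible_distinct_slots >= num_servers_to_check * k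
--
--     low = 0
--     high = min(n, len(upgrades) // k)
--
--     ans = 0
--     while low <= high:
--         mid = low + (high - low) // 2
--         if can_upgrade(mid):
--             ans = mid
--             low = mid + 1
--         else:
--             high = mid - 1
--
--     return ans
-- ===== SOURCE B (Python) =====
-- import collections
--
-- def max_upgradable_servers(n: int, k: int, upgrades: list[int]) -> int:
--     counts = collections.Counter(upgrades)
--     high = min(n, len(upgrades) // k)
--     for m in range(high, 0, -1):
--         if sum(min(c, m) for c in counts.values()) >= m * k:
--             return m
--     return 0
-- ===== Notes on version B (the rewrite author's own statement) =====
-- stated objective: simpler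
-- what changed: Replaces A's binary search (with its ans-tracking loop and midpoint arithmetic) by a single descending linear scan that returns the first feasible m, correct because the feasibility predicate is downward-closed; the feasible sum is computed with sum() over a generator instead of an accumulator loop.
-- outside the precondition, e.g. on max_upgradable_servers(3, 0, [1, 2]): A raises ZeroDivisionError, B raises ZeroDivisionError
import Mathlib
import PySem

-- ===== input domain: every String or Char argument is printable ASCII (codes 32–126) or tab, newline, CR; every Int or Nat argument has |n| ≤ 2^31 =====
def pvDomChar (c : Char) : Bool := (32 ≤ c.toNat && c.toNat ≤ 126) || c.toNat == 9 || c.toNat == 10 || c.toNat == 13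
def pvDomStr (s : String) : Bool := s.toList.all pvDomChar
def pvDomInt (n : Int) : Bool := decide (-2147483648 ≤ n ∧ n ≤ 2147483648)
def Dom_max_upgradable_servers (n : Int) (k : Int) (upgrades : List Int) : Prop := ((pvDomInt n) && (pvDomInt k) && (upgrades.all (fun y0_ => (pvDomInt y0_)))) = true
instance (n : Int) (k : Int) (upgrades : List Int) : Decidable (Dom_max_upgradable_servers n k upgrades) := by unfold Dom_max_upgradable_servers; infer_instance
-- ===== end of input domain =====

-- B replaces A's binary search by a single descending scan returning the first feasible m
-- (equal because feasibility is downward-closed); objective: simpler, no speed claim.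

-- ===== PORT A =====
def pvCanUpgrade (cnt : PySem.Dict Int Int) (k : Int) (m : Int) : Bool :=
  if m == 0 then true
  else
    let total := cnt.values.foldl (fun s c => s + min c m) 0
    decide (total ≥ m * k)

def pvBsLoop (cnt : PySem.Dict Int Int) (k : Int) : Nat → Int → Int → Int → Int
  | 0, _, _, ans => ans  -- fuel guard only: the fuel passed below always suffices
  | fuel + 1, low, high, ans =>
    if low ≤ high then
      let mid := low + PySem.Int.floordiv (high - low) 2
      if pvCanUpgrade cnt k mid then pvBsLoop cnt k fuel (mid + 1) high mid
      else pvBsLoop cnt k fuel low (mid - 1) ans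
    else ans

def max_upgradable_servers (n : Int) (k : Int) (upgrades : List Int) : Int :=
  let cnt := PySem.Dict.counter upgrades
  let high := min n (PySem.Int.floordiv (upgrades.length : Int) k)
  pvBsLoop cnt k (high + 1).toNat 0 high 0

-- ===== PORT B =====
def pvScan (cnt : PySem.Dict Int Int) (k : Int) : Nat → Int
  | 0 => 0
  | m + 1 =>
    if ((cnt.values.map (fun c => min c ((m + 1 : Nat) : Int))).sum ≥ ((m + 1 : Nat) : Int) * k)
    then ((m + 1 : Nat) : Int) else pvScan cnt k m

def max_upgradable_servers_alt (n : Int) (k : Int) (upgrades : List Int) : Int :=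
  let cnt := PySem.Dict.counter upgrades
  let high := min n (PySem.Int.floordiv (upgrades.length : Int) k)
  pvScan cnt k high.toNat

-- ===== PRECONDITION & SPEC =====
-- Pre_ excludes k = 0, on which Python A raises ZeroDivisionError at len(upgrades) // k.
def Pre_max_upgradable_servers (n : Int) (k : Int) (upgrades : List Int) : Prop := k ≠ 0
instance (n : Int) (k : Int) (upgrades : List Int) : Decidable (Pre_max_upgradable_servers n k upgrades) := by unfold Pre_max_upgradable_servers; infer_instance
def pvWitness_max_upgradable_servers : Int × Int × List Int := (3, 2, [1, 1, 2, 3])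

def Spec_max_upgradable_servers (n : Int) (k : Int) (upgrades : List Int) (out : Int) : Prop := out = max_upgradable_servers_alt n k upgrades
instance (n : Int) (k : Int) (upgrades : List Int) (out : Int) : Decidable (Spec_max_upgradable_servers n k upgrades out) := by unfold Spec_max_upgradable_servers; infer_instance

-- ===== CLAIM (what is proved, stated in full; the proofs are below) =====
def Claim_equal_max_upgradable_servers : Prop := ∀ (n : Int) (k : Int) (upgrades : List Int), Dom_max_upgradable_servers n k upgrades → Pre_max_upgradable_servers n k upgrades → Spec_max_upgradable_servers n k upgrades (max_upgradable_servers n k upgrades)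

-- ===== LEMMAS AND PROOFS =====

-- shorthand used only in the proofs: the feasibility predicate
def pvFeas (vals : List Int) (k m : Int) : Prop := (vals.map (fun c => min c m)).sum ≥ m * k

theorem feas_zero (vals : List Int) (k : Int) (hnn : ∀ c ∈ vals, 0 ≤ c) : pvFeas vals k 0 := by
  unfold pvFeas
  have : (vals.map (fun c => min c 0)).sum = 0 := by
    apply List.sum_eq_zero
    intro x hx
    simp only [List.mem_map] at hx
    obtain ⟨c, hc, rfl⟩ := hx
    have := hnn c hc
    omega
  simp [this]

theorem feas_mono (vals : List Int) (k m' m : Int)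
    (hnn : ∀ c ∈ vals, 0 ≤ c) (h0 : 0 ≤ m') (hle : m' ≤ m) (hf : pvFeas vals k m) :
    pvFeas vals k m' := by
  rcases eq_or_lt_of_le (h0.trans hle) with hm0 | hmpos
  · have : m' = 0 := by omega
    subst this; exact feas_zero vals k hnn
  · have key : ∀ (l : List Int), (∀ c ∈ l, 0 ≤ c) →
        m' * (l.map (fun c => min c m)).sum ≤ m * (l.map (fun c => min c m')).sum := by
      intro l hl
      induction l with
      | nil => simp
      | cons a tl ih =>
        have ha := hl a (by simp)
        have htl := ih (fun c hc => hl c (List.mem_cons_of_mem a hc))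
        have hpt : m' * min a m ≤ m * min a m' := by
          rcases le_total a m' with h1 | h1 <;> rcases le_total a m with h2 | h2 <;>
            simp [*] <;> nlinarith
        simp only [List.map_cons, List.sum_cons, mul_add]
        exact add_le_add hpt htl
    unfold pvFeas at hf ⊢
    have h2 := key vals hnn
    nlinarith [hf, h2]

theorem counter_values_nonneg (xs : List Int) :
    ∀ c ∈ (PySem.Dict.counter xs).values, 0 ≤ c := by
  intro c hc
  have hv : (PySem.Dict.counter xs).values
      = (PySem.Set.ofList xs).map (fun v => ((xs.count v : Nat) : Int)) := by
    simp only [PySem.Dict.values, PySem.Dict.items_counter, List.map_map]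
    rfl
  rw [hv] at hc
  simp only [List.mem_map] at hc
  obtain ⟨a, _, rfl⟩ := hc
  exact Int.natCast_nonneg _

theorem canUpgrade_iff (cnt : PySem.Dict Int Int) (k m : Int)
    (hnn : ∀ c ∈ cnt.values, 0 ≤ c) (h0 : 0 ≤ m) :
    pvCanUpgrade cnt k m = true ↔ pvFeas cnt.values k m := by
  unfold pvCanUpgrade
  by_cases hm : m = 0
  · subst hm
    simp [feas_zero cnt.values k hnn]
  · rw [if_neg (by simpa using hm)]
    have hbridge : cnt.values.foldl (fun s c => s + min c m) 0
        = (cnt.values.map (fun c => min c m)).sum := by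
      rw [PySem.List.foldl_add]; ring
    simp [hbridge, pvFeas]

theorem scan_props (cnt : PySem.Dict Int Int) (k : Int) (t : Nat) :
    (0 ≤ pvScan cnt k t ∧ pvScan cnt k t ≤ (t : Int) ∧
      (pvScan cnt k t = 0 ∨ pvFeas cnt.values k (pvScan cnt k t))) ∧
    (∀ m : Int, pvScan cnt k t < m → m ≤ (t : Int) → ¬ pvFeas cnt.values k m) := by
  induction t with
  | zero =>
    refine ⟨⟨le_rfl, le_rfl, Or.inl rfl⟩, ?_⟩
    intro m h1 h2
    simp only [pvScan, Nat.cast_zero] at h1 h2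
    omega
  | succ t ih =>
    by_cases hco : (cnt.values.map (fun c => min c ((t + 1 : Nat) : Int))).sum ≥ ((t + 1 : Nat) : Int) * k
    · have hs : pvScan cnt k (t + 1) = ((t + 1 : Nat) : Int) := by
        simp only [pvScan, if_pos hco]
      refine ⟨⟨by rw [hs]; positivity, by rw [hs], Or.inr (by rw [hs]; exact hco)⟩, ?_⟩
      intro m h1 h2
      rw [hs] at h1
      omega
    · have hs : pvScan cnt k (t + 1) = pvScan cnt k t := by
        simp only [pvScan, if_neg hco]
      rw [hs]
      obtain ⟨⟨i1, i2, i3⟩, i4⟩ := ih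
      refine ⟨⟨i1, by push_cast; omega, i3⟩, ?_⟩
      intro m h1 h2
      by_cases hmt : m ≤ (t : Int)
      · exact i4 m h1 hmt
      · have : m = ((t + 1 : Nat) : Int) := by push_cast at h2 ⊢; omega
        subst this
        exact hco

theorem bs_eq (cnt : PySem.Dict Int Int) (k : Int) (t : Nat)
    (hnn : ∀ c ∈ cnt.values, 0 ≤ c) :
    ∀ (fuel : Nat) (low high ans : Int), (high + 1 - low).toNat ≤ fuel →
    0 ≤ low → low - 1 ≤ ans → ans ≤ pvScan cnt k t →
    low ≤ pvScan cnt k t + 1 → pvScan cnt k t ≤ high → high ≤ (t : Int) →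
    pvBsLoop cnt k fuel low high ans = pvScan cnt k t := by
  intro fuel
  induction fuel with
  | zero =>
    intro low high ans hfu hl0 h1 h2 h3 h4 h5
    simp only [pvBsLoop]
    omega
  | succ fuel ih =>
    intro low high ans hfu hl0 h1 h2 h3 h4 h5
    simp only [pvBsLoop]
    by_cases hlh : low ≤ high
    · rw [if_pos hlh]
      have hfd := PySem.Int.floordiv_eq_ediv_of_pos (a := high - low) (b := 2) (by norm_num : (0:Int) < 2)
      have hmb : low ≤ low + PySem.Int.floordiv (high - low) 2 ∧
          low + PySem.Int.floordiv (high - low) 2 ≤ high := by rw [hfd]; omega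
      set mid := low + PySem.Int.floordiv (high - low) 2 with hmid
      by_cases hcu : pvCanUpgrade cnt k mid = true
      · rw [if_pos hcu]
        have hfe : pvFeas cnt.values k mid := (canUpgrade_iff cnt k mid hnn (by omega)).mp hcu
        have hmD : mid ≤ pvScan cnt k t := by
          by_contra hgt
          exact (scan_props cnt k t).2 mid (by omega) (by omega) hfe
        exact ih (mid + 1) high mid (by omega) (by omega) (by omega) hmD (by omega) h4 h5
      · rw [if_neg hcu]
        have hDm : pvScan cnt k t < mid := by
          by_contra hle2
          rcases (scan_props cnt k t).1.2.2 with hD0 | hDf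
          · have hm0 : mid = 0 := by omega
            apply hcu
            rw [hm0]
            simp [pvCanUpgrade]
          · exact hcu ((canUpgrade_iff cnt k mid hnn (by omega)).mpr
              (feas_mono cnt.values k mid (pvScan cnt k t) hnn (by omega) (by omega) hDf))
        exact ih low (mid - 1) ans (by omega) hl0 h1 h2 h3 (by omega) (by omega)
    · rw [if_neg hlh]
      omega

-- ===== VERDICT (by name: the statement is the Claim_ definition above) =====
theorem max_upgradable_servers_spec : Claim_equal_max_upgradable_servers := by
  intro n k upgrades _ _
  unfold Spec_max_upgradable_servers max_upgradable_servers max_upgradable_servers_alt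
  set cnt := PySem.Dict.counter upgrades with hcnt
  set high := min n (PySem.Int.floordiv (upgrades.length : Int) k) with hh
  show pvBsLoop cnt k (high + 1).toNat 0 high 0 = pvScan cnt k high.toNat
  by_cases hpos : 0 ≤ high
  · have ht : ((high.toNat : Nat) : Int) = high := Int.toNat_of_nonneg hpos
    have hp := scan_props cnt k high.toNat
    exact bs_eq cnt k high.toNat (counter_values_nonneg upgrades) (high + 1).toNat 0 high 0
      (by omega) le_rfl (by omega) hp.1.1 (by have := hp.1.1; omega) (by rw [← ht]; exact hp.1.2.1) (by omega)
  · have h0 : high.toNat = 0 := by omega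
    have hf : (high + 1).toNat = 0 := by omega
    rw [h0, hf]
    simp [pvBsLoop, pvScan]
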